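-- pv_equiv track=rewrite | github.com/aidanrfraser/CompSci106 | CountSinglesTiming.py | count_singlesB
-- ===== SOURCE A (Python) =====
-- def count_singlesB(key, alist):
--     """
--     Counts the appearances of key in alist if key is not next to itself using a state variable
--     """
--     num = 0
--     result = 0
--     for element in alist:
--         if num == 0 and element == key:
--             result += 1
--             num = 1
--         elif num == 1 and element == key:
--             result -= 1
--             num += 1
--         elif num > 1 and element == key:
--             num += 1
--         elif element == key:
--             num = 1
--         else:
--             num = 0
--     return result
-- ===== SOURCE B (Python) =====
-- from itertools import groupby
--
-- def count_singlesB(key, alist):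
--     """Counts maximal runs of key in alist that have length exactly 1."""
--     return sum(1 for k, g in groupby(alist)
--                if k == key and sum(1 for _ in g) == 1)
-- ===== Notes on version B (the rewrite author's own statement) =====
-- stated objective: idiomatic
-- what changed: Replaced the +1/-1 state-variable bookkeeping with an itertools.groupby run partition, counting runs equal to key of length exactly 1.
import Mathlib
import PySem

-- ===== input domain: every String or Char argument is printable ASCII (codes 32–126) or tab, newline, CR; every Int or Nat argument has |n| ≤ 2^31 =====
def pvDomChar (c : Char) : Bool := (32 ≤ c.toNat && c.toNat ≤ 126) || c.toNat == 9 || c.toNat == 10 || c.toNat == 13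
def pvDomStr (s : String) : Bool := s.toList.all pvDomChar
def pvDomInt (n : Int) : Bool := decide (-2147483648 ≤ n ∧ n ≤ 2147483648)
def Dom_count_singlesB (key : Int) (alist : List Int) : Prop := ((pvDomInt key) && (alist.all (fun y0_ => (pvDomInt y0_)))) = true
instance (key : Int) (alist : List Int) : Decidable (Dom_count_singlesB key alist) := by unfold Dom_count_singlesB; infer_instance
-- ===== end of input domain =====

-- B replaces A's +1/-1 state-variable loop by a groupby-style run partition
-- (maximal runs of equal elements) filtered for runs of key of length 1; same cost.

-- ===== PORT A =====
-- state = (num, result); one foldl step per element, branches in A's order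
def pvStepA (key : Int) (st : Int × Int) (element : Int) : Int × Int :=
  if st.1 = 0 ∧ element = key then (1, st.2 + 1)
  else if st.1 = 1 ∧ element = key then (st.1 + 1, st.2 - 1)
  else if st.1 > 1 ∧ element = key then (st.1 + 1, st.2)
  else if element = key then (1, st.2)
  else (0, st.2)

def count_singlesB (key : Int) (alist : List Int) : Int :=
  (alist.foldl (pvStepA key) (0, 0)).2

-- ===== PORT B =====
-- itertools.groupby: the list of maximal runs of equal adjacent elements, as (value, length)
def pvGroups : List Int → List (Int × Int)
  | [] => []
  | x :: xs =>
      (x, 1 + (xs.takeWhile (· = x)).length) :: pvGroups (xs.dropWhile (· = x))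
termination_by l => l.length
decreasing_by
  simpa using Nat.lt_succ_of_le (List.length_dropWhile_le _ _)

-- sum(1 for k, g in groupby(alist) if k == key and len(g) == 1)
def count_singlesB_alt (key : Int) (alist : List Int) : Int :=
  (pvGroups alist).foldl (fun acc p => if p.1 = key ∧ p.2 = 1 then acc + 1 else acc) 0

-- ===== PRECONDITION & SPEC =====
def Spec_count_singlesB (key : Int) (alist : List Int) (out : Int) : Prop := out = count_singlesB_alt key alist
instance (key : Int) (alist : List Int) (out : Int) : Decidable (Spec_count_singlesB key alist out) := by unfold Spec_count_singlesB; infer_instance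

-- ===== CLAIM (what is proved, stated in full; the proofs are below) =====
def Claim_equal_count_singlesB : Prop := ∀ (key : Int) (alist : List Int), Dom_count_singlesB key alist → Spec_count_singlesB key alist (count_singlesB key alist)

-- ===== LEMMAS AND PROOFS =====

-- shift lemma for B's counting fold
theorem pvFoldShift (key : Int) (l : List (Int × Int)) (a : Int) :
    l.foldl (fun acc p => if p.1 = key ∧ p.2 = 1 then acc + 1 else acc) a
      = a + l.foldl (fun acc p => if p.1 = key ∧ p.2 = 1 then acc + 1 else acc) 0 := by
  induction l generalizing a with
  | nil => simp
  | cons p l ih =>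
      simp only [List.foldl_cons]
      rw [ih, ih (if p.1 = key ∧ p.2 = 1 then 0 + 1 else 0)]
      split_ifs <;> ring

-- dropping a leading block of a non-key value does not change B's count
theorem pvAltDrop (key x : Int) (hx : x ≠ key) (xs : List Int) :
    count_singlesB_alt key xs = count_singlesB_alt key (xs.dropWhile (· = x)) := by
  induction xs with
  | nil => simp
  | cons z zs _ =>
      by_cases hz : z = x
      · subst hz
        simp only [count_singlesB_alt, pvGroups, List.foldl_cons, List.dropWhile_cons,
          decide_true]
        rw [pvFoldShift, if_neg (by simp [hx])]
        simp
      · simp [List.dropWhile_cons, hz]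

-- prepending a non-key element does not change B's count
theorem pvAltCons_ne (key x : Int) (xs : List Int) (hx : x ≠ key) :
    count_singlesB_alt key (x :: xs) = count_singlesB_alt key xs := by
  conv_lhs => rw [count_singlesB_alt, pvGroups]
  simp only [List.foldl_cons]
  rw [pvFoldShift, if_neg (by simp [hx]), pvAltDrop key x hx xs]
  simp [count_singlesB_alt]

-- while num ≥ 2, key elements only grow num; the first non-key resets to state 0
theorem pvL2 (key : Int) (zs : List Int) : ∀ (n r : Int), 2 ≤ n →
    (zs.foldl (pvStepA key) (n, r)).2
      = ((zs.dropWhile (· = key)).foldl (pvStepA key) (0, r)).2 := by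
  induction zs with
  | nil => intro n r _; simp
  | cons z zs ih =>
      intro n r hn
      by_cases hz : z = key
      · subst hz
        have hstep : pvStepA z (n, r) z = (n + 1, r) := by
          simp only [pvStepA, and_true]
          split_ifs with h1 h2 h3 <;> first | rfl | (exfalso; omega)
        simp only [List.foldl_cons, hstep, List.dropWhile_cons, decide_true, if_pos rfl]
        exact ih (n + 1) r (by omega)
      · have hstep : pvStepA key (n, r) z = (0, r) := by
          unfold pvStepA; split_ifs with h1 h2 h3 h4 <;> first | rfl | omega | simp_all
        have hstep0 : pvStepA key (0, r) z = (0, r) := by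
          unfold pvStepA; split_ifs with h1 h2 h3 h4 <;> first | rfl | omega | simp_all
        simp only [List.foldl_cons, hstep, List.dropWhile_cons, hz, decide_eq_true_eq]
        simp [hstep0]

-- main invariant: from state (0, r), A's fold computes r + B's run count
theorem pvL0 (key : Int) (xs : List Int) (r : Int) :
    (xs.foldl (pvStepA key) (0, r)).2 = r + count_singlesB_alt key xs := by
  match xs with
  | [] => simp [count_singlesB_alt, pvGroups]
  | x :: xs =>
      by_cases hx : x = key
      · subst hx
        have hstep : pvStepA x ((0 : Int), r) x = (1, r + 1) := by
          unfold pvStepA; rw [if_pos ⟨rfl, rfl⟩]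
        match xs with
        | [] =>
            simp [hstep, count_singlesB_alt, pvGroups]
        | y :: ys =>
            by_cases hy : y = x
            · subst hy
              have hstep2 : pvStepA y ((1 : Int), r + 1) y = (2, r) := by
                unfold pvStepA
                rw [if_neg (by simp), if_pos (by simp)]
                norm_num
              have h2 := pvL2 y ys 2 r (by norm_num)
              have hrec := pvL0 y (ys.dropWhile (· = y)) r
              have hgrp : count_singlesB_alt y (y :: y :: ys)
                  = count_singlesB_alt y (ys.dropWhile (· = y)) := by
                conv_lhs => rw [count_singlesB_alt, pvGroups]
                rw [List.foldl_cons, pvFoldShift]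
                rw [if_neg (by
                  intro h
                  have h2 := h.2
                  simp only [List.takeWhile_cons, decide_true, if_true,
                    List.length_cons] at h2
                  push_cast at h2
                  omega)]
                simp [count_singlesB_alt]
              simp only [List.foldl_cons, hstep, hstep2]
              rw [h2, hrec, hgrp]
            · have hstep2 : pvStepA x ((1 : Int), r + 1) y = (0, r + 1) := by
                simp [pvStepA, hy]
              have hstepy : pvStepA x ((0 : Int), r + 1) y = (0, r + 1) := by
                simp [pvStepA, hy]
              have hrec := pvL0 x (y :: ys) (r + 1)
              have hgrp : count_singlesB_alt x (x :: y :: ys)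
                  = 1 + count_singlesB_alt x (y :: ys) := by
                conv_lhs => rw [count_singlesB_alt, pvGroups]
                rw [List.foldl_cons, pvFoldShift]
                rw [if_pos (by simp [hy])]
                simp [hy, count_singlesB_alt]
              simp only [List.foldl_cons, hstep, hstep2]
              simp only [List.foldl_cons, hstepy] at hrec
              rw [hrec, hgrp]; ring
      · have hstep : pvStepA key ((0 : Int), r) x = (0, r) := by
          simp [pvStepA, hx]
        have hrec := pvL0 key xs r
        simp only [List.foldl_cons, hstep]
        rw [hrec, pvAltCons_ne key x xs hx]
termination_by xs.length
decreasing_by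
  · simp
    exact Nat.le_succ_of_le (List.length_dropWhile_le _ _)
  · simp
  · simp

-- ===== VERDICT (by name: the statement is the Claim_ definition above) =====
theorem count_singlesB_spec : Claim_equal_count_singlesB := by
  intro key alist _
  unfold Spec_count_singlesB count_singlesB
  simpa using pvL0 key alist 0
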